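-- pv_equiv track=rewrite | github.com/JvrChavez/lector | contar_palabras.py | contarclavesystops
-- ===== SOURCE A (Python) =====
-- def contarclavesystops(lista_palabras,topes):
--   dpc=dict()
--   dps=dict()
--   for palabra in lista_palabras:
--     p=palabra.lower().strip(',.')
--     if p in topes:
--       if p in dps:
--         dps[p]+=1
--       else:
--         dps[p]=1
--     else:
--       if p in dpc:
--         dpc[p]+=1
--       else:
--         dpc[p]=1
--   return dpc,dps
-- ===== SOURCE B (Python) =====
-- def contarclavesystops(lista_palabras, topes):
--   # Pass 1: one frequency table of the normalized words (first-occurrence key order).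
--   counts = {}
--   for palabra in lista_palabras:
--     p = palabra.lower().strip(',.')
--     counts[p] = counts.get(p, 0) + 1
--   # Pass 2: classify each UNIQUE word once.
--   dpc = {}
--   dps = {}
--   for w, c in counts.items():
--     if w in topes:
--       dps[w] = c
--     else:
--       dpc[w] = c
--   return dpc, dps
-- ===== Notes on version B (the rewrite author's own statement) =====
-- stated objective: simpler
-- what changed: B first builds one frequency table of all normalized words and then classifies each unique word once into stop/non-stop, instead of A's inline per-occurrence classification with a double membership test per occurrence; the stopword membership test runs once per distinct word instead of once per occurrence.
import Mathlib
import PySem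

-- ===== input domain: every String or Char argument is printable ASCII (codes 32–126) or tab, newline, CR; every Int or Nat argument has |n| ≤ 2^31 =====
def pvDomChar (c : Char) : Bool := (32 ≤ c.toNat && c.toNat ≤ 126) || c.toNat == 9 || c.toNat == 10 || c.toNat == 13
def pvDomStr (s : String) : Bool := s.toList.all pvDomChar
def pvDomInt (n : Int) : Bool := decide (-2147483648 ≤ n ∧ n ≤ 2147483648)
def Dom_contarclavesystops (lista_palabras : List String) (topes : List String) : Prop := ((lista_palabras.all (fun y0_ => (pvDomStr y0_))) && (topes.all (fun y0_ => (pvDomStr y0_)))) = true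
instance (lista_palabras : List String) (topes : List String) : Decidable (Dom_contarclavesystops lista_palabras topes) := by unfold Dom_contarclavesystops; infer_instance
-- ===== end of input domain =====

-- B replaces A's per-occurrence inline classification by a single frequency table built in one
-- pass, followed by one classification pass over the unique words (objective: simpler).

-- ===== PORT A =====
-- p = palabra.lower().strip(',.')  (normalization used by both programs)
def pvNorm (s : String) : String := PySem.Str.stripChars (PySem.Str.lower s) ",."

def contarclavesystops (lista_palabras : List String) (topes : List String) :
    (List (String × Int)) × (List (String × Int)) :=
  let st := lista_palabras.foldl
    (fun (st : PySem.Dict String Int × PySem.Dict String Int) palabra =>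
      if topes.contains (pvNorm palabra) then
        (st.1, if st.2.contains (pvNorm palabra) then
            st.2.insert (pvNorm palabra) (st.2.getD (pvNorm palabra) 0 + 1)
          else st.2.insert (pvNorm palabra) 1)
      else
        (if st.1.contains (pvNorm palabra) then
            st.1.insert (pvNorm palabra) (st.1.getD (pvNorm palabra) 0 + 1)
          else st.1.insert (pvNorm palabra) 1, st.2))
    (PySem.Dict.empty, PySem.Dict.empty)
  (st.1.items, st.2.items)

-- ===== PORT B =====
def contarclavesystops_alt (lista_palabras : List String) (topes : List String) :
    (List (String × Int)) × (List (String × Int)) :=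
  -- Pass 1: one frequency table of the normalized words.
  let counts := lista_palabras.foldl
    (fun (d : PySem.Dict String Int) palabra =>
      d.insert (pvNorm palabra) (d.getD (pvNorm palabra) 0 + 1))
    PySem.Dict.empty
  -- Pass 2: classify each unique word once.
  let r := counts.items.foldl
    (fun (st : PySem.Dict String Int × PySem.Dict String Int) wc =>
      if topes.contains wc.1 then (st.1, st.2.insert wc.1 wc.2)
      else (st.1.insert wc.1 wc.2, st.2))
    (PySem.Dict.empty, PySem.Dict.empty)
  (r.1.items, r.2.items)

-- ===== PRECONDITION & SPEC =====
def Spec_contarclavesystops (lista_palabras : List String) (topes : List String) (out : (List (String × Int)) × (List (String × Int))) : Prop := out = contarclavesystops_alt lista_palabras topes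
instance (lista_palabras : List String) (topes : List String) (out : (List (String × Int)) × (List (String × Int))) : Decidable (Spec_contarclavesystops lista_palabras topes out) := by unfold Spec_contarclavesystops; infer_instance

-- ===== CLAIM (what is proved, stated in full; the proofs are below) =====
def Claim_equal_contarclavesystops : Prop := ∀ (lista_palabras : List String) (topes : List String), Dom_contarclavesystops lista_palabras topes → Spec_contarclavesystops lista_palabras topes (contarclavesystops lista_palabras topes)

-- ===== LEMMAS AND PROOFS =====

-- A's "if present then +=1 else =1" update is the single insert-with-default update.
lemma pvStep_insert (d : PySem.Dict String Int) (w : String) :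
    (if d.contains w then d.insert w (d.getD w 0 + 1) else d.insert w 1)
      = d.insert w (d.getD w 0 + 1) := by
  by_cases h : d.contains w = true
  · simp [h]
  · have h' : d.contains w = false := by simpa using h
    simp [h', PySem.Dict.getD_of_not_contains]

-- A's pair fold splits into two independent counting folds over the filtered word lists.
lemma foldA_split (topes : List String) (lp : List String) :
    ∀ (x y : PySem.Dict String Int),
      List.foldl
        (fun (st : PySem.Dict String Int × PySem.Dict String Int) palabra =>
          if topes.contains (pvNorm palabra) then
            (st.1, if st.2.contains (pvNorm palabra) then
                st.2.insert (pvNorm palabra) (st.2.getD (pvNorm palabra) 0 + 1)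
              else st.2.insert (pvNorm palabra) 1)
          else
            (if st.1.contains (pvNorm palabra) then
                st.1.insert (pvNorm palabra) (st.1.getD (pvNorm palabra) 0 + 1)
              else st.1.insert (pvNorm palabra) 1, st.2))
        (x, y) lp
      = (((lp.map pvNorm).filter (fun w => !(topes.contains w))).foldl
           (fun d w => d.insert w (d.getD w 0 + 1)) x,
         ((lp.map pvNorm).filter (fun w => topes.contains w)).foldl
           (fun d w => d.insert w (d.getD w 0 + 1)) y) := by
  induction lp with
  | nil => intro x y; rfl
  | cons a lp ih =>
    intro x y
    simp only [List.foldl_cons, List.map_cons, List.filter_cons]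
    by_cases h : topes.contains (pvNorm a) = true
    · have hneg : ¬ ((!topes.contains (pvNorm a)) = true) := by rw [h]; decide
      rw [if_pos h, if_pos h, if_neg hneg, pvStep_insert]
      exact ih x _
    · have h' : topes.contains (pvNorm a) = false := by simpa using h
      have hpos : (!topes.contains (pvNorm a)) = true := by
        rw [h']; decide
      rw [if_neg h, if_neg h, if_pos hpos, pvStep_insert]
      exact ih _ y

-- B's partition fold splits the same way over the items list.
lemma foldB_split (topes : List String) (l : List (String × Int)) :
    ∀ (x y : PySem.Dict String Int),
      List.foldl
        (fun (st : PySem.Dict String Int × PySem.Dict String Int) wc =>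
          if topes.contains wc.1 then (st.1, st.2.insert wc.1 wc.2)
          else (st.1.insert wc.1 wc.2, st.2))
        (x, y) l
      = ((l.filter (fun p => !(topes.contains p.1))).foldl
           (fun (d : PySem.Dict String Int) p => d.insert p.1 p.2) x,
         (l.filter (fun p => topes.contains p.1)).foldl
           (fun (d : PySem.Dict String Int) p => d.insert p.1 p.2) y) := by
  induction l with
  | nil => intro x y; rfl
  | cons a l ih =>
    intro x y
    simp only [List.foldl_cons, List.filter_cons]
    by_cases h : topes.contains a.1 = true
    · have hneg : ¬ ((!topes.contains a.1) = true) := by rw [h]; decide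
      rw [if_pos h, if_pos h, if_neg hneg]
      exact ih x _
    · have h' : topes.contains a.1 = false := by simpa using h
      have hpos : (!topes.contains a.1) = true := by
        rw [h']; decide
      rw [if_neg h, if_neg h, if_pos hpos]
      exact ih _ y

-- set(filter) = filter(set): first-occurrence dedup commutes with filtering.
lemma pvOfList_filter (q : String → Bool) (ws : List String) :
    PySem.Set.ofList (ws.filter q) = (PySem.Set.ofList ws).filter q := by
  induction ws with
  | nil => rfl
  | cons a ws ih =>
    by_cases h : q a = true
    · rw [List.filter_cons_of_pos h, PySem.Set.ofList_cons, PySem.Set.ofList_cons, ih,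
        List.filter_cons_of_pos h]
      congr 1
      simp only [PySem.Set.discard, List.filter_filter]
      exact List.filter_congr (fun y _ => Bool.and_comm _ _)
    · have h' : q a = false := by simpa using h
      rw [List.filter_cons_of_neg (by simp [h']), PySem.Set.ofList_cons, ih,
        List.filter_cons_of_neg (by simp [h'])]
      simp only [PySem.Set.discard, List.filter_filter]
      refine (List.filter_congr (fun y _ => ?_)).symm
      by_cases hq : q y = true
      · have hya : (y == a) = false := by
          cases heq : y == a
          · rfl
          · exact absurd (eq_of_beq heq ▸ hq) (by simp [h'])
        simp [hq, hya]
      · simp [show q y = false by simpa using hq]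

-- A's counting fold over a filtered list, as a map over the filtered unique words.
lemma pvA_side (q : String → Bool) (ws : List String) :
    ((ws.filter q).foldl (fun (d : PySem.Dict String Int) w => d.insert w (d.getD w 0 + 1))
        PySem.Dict.empty).items
      = ((PySem.Set.ofList ws).filter q).map (fun k => (k, (ws.count k : Int))) := by
  rw [PySem.Dict.foldl_insert_getD_add_one_eq_counter, PySem.Dict.items_counter, pvOfList_filter]
  refine List.map_congr_left (fun k hk => ?_)
  have hq : q k = true := (List.mem_filter.mp hk).2
  rw [List.count_filter hq]

-- Inserting distinct fresh keyed pairs into an empty dict just lists them.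
lemma pvB_side (S : List String) (hS : S.Nodup) (v : String → Int) :
    ((S.map (fun k => (k, v k))).foldl
        (fun (d : PySem.Dict String Int) p => d.insert p.1 p.2) PySem.Dict.empty).items
      = S.map (fun k => (k, v k)) := by
  have h := PySem.Dict.items_foldl_insert_fresh (S.map (fun k => (k, v k))) Prod.fst Prod.snd
    PySem.Dict.empty (fun a _ => by simp) (by simpa [List.map_map, Function.comp_def] using hS)
  simpa using h

lemma pv_eq (lp topes : List String) :
    contarclavesystops lp topes = contarclavesystops_alt lp topes := by
  have hB1 : lp.foldl
      (fun (d : PySem.Dict String Int) palabra =>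
        d.insert (pvNorm palabra) (d.getD (pvNorm palabra) 0 + 1)) PySem.Dict.empty
      = PySem.Dict.counter (lp.map pvNorm) := by
    rw [← PySem.Dict.foldl_insert_getD_add_one_eq_counter, List.foldl_map]
  have hnd : ((PySem.Set.ofList (lp.map pvNorm)) : List String).Nodup :=
    PySem.Set.nodup_ofList _
  simp only [contarclavesystops, contarclavesystops_alt]
  rw [foldA_split, hB1, foldB_split, pvA_side, pvA_side, PySem.Dict.items_counter,
    List.filter_map, List.filter_map,
    pvB_side _ (hnd.filter _) (fun k => ((lp.map pvNorm).count k : Int)),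
    pvB_side _ (hnd.filter _) (fun k => ((lp.map pvNorm).count k : Int))]
  rfl

-- ===== VERDICT (by name: the statement is the Claim_ definition above) =====
theorem contarclavesystops_spec : Claim_equal_contarclavesystops := by
  intro lp topes _
  unfold Spec_contarclavesystops
  exact pv_eq lp topes
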